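-- pv_equiv track=rewrite | github.com/CodeSteel/HighschoolPythonProjects | GoogleAPI/GILG/gilg.py | getLyricDuration
-- ===== SOURCE A (Python) =====
-- def getLyricDuration(tupTable, mp4Length):
-- 	sub = []
-- 	for i in range(len(tupTable)):
-- 		if i == 0:
-- 			sub.append((tupTable[i][0], tupTable[1][1]))
-- 		elif i < len(tupTable) - 1:
-- 			sub.append((tupTable[i][0], tupTable[i+1][1] - tupTable[i][1]))
-- 		else:
-- 			sub.append((tupTable[i][0], int(mp4Length) - tupTable[i][1]))
-- 	return sub
-- ===== SOURCE B (Python) =====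
-- def getLyricDuration(tupTable, mp4Length):
--     # Reverse single pass carrying the "next timestamp" accumulator; builds the
--     # output back-to-front and reverses once. The head entry (lyric 0 paired
--     # with lyric 1's timestamp, as A computes) is emitted last.
--     if not tupTable:
--         return []
--     out = []
--     nxt = int(mp4Length)
--     for name, ts in reversed(tupTable[1:]):
--         out.append((name, nxt - ts))
--         nxt = ts
--     out.append((tupTable[0][0], tupTable[1][1]))
--     out.reverse()
--     return out
-- ===== Notes on version B (the rewrite author's own statement) =====
-- stated objective: alternative
-- what changed: Replaces A's forward indexed loop with three positional branches and random access at i+1 by a single reverse pass that carries the next timestamp in an accumulator, builds the result back-to-front and reverses once; only the head entry is emitted explicitly.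
import Mathlib
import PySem

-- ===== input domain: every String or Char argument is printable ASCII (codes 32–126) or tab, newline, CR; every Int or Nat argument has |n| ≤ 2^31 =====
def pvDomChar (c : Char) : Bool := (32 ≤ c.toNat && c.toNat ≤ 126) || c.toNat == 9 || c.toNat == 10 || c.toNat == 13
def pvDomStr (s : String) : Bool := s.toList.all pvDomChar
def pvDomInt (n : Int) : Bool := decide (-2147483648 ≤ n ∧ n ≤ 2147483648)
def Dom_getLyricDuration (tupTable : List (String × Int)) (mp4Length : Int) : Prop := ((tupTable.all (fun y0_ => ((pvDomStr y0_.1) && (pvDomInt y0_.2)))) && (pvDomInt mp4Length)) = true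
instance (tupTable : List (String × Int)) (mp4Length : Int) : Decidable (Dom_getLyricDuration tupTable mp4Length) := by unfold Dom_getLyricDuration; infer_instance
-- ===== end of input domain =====

-- B replaces A's forward indexed loop (three positional branches, random access
-- at i+1) by a single reverse pass carrying the next timestamp in an
-- accumulator, building the output back-to-front; same O(n) cost.

-- ===== PORT A =====
-- index loop over range(len(tupTable)); tupTable[i] etc. ported with pyGetD
-- (total form of xs[i]; always in range on the inputs Pre_ admits).
def getLyricDuration (tupTable : List (String × Int)) (mp4Length : Int) : List (String × Int) :=
  (PySem.List.pyRange 0 (tupTable.length : Int) 1).foldl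
    (fun sub i =>
      if i = 0 then
        sub ++ [((PySem.List.pyGetD tupTable i ("", 0)).1,
                 (PySem.List.pyGetD tupTable 1 ("", 0)).2)]
      else if i < (tupTable.length : Int) - 1 then
        sub ++ [((PySem.List.pyGetD tupTable i ("", 0)).1,
                 (PySem.List.pyGetD tupTable (i + 1) ("", 0)).2
                   - (PySem.List.pyGetD tupTable i ("", 0)).2)]
      else
        sub ++ [((PySem.List.pyGetD tupTable i ("", 0)).1,
                 mp4Length - (PySem.List.pyGetD tupTable i ("", 0)).2)])
    []

-- ===== PORT B =====
-- loop state: (out, nxt); iterates reversed(tupTable[1:]), then appends the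
-- head entry and reverses.
def getLyricDuration_alt (tupTable : List (String × Int)) (mp4Length : Int) : List (String × Int) :=
  match tupTable with
  | [] => []
  | _ =>
    let st := (PySem.List.slice tupTable (some 1) none).reverse.foldl
      (fun (st : List (String × Int) × Int) p =>
        (st.1 ++ [(p.1, st.2 - p.2)], p.2)) ([], mp4Length)
    (st.1 ++ [((PySem.List.pyGetD tupTable 0 ("", 0)).1,
               (PySem.List.pyGetD tupTable 1 ("", 0)).2)]).reverse

-- ===== PRECONDITION & SPEC =====
-- Pre_ excludes exactly the singleton lists, on which both A and B raise
-- IndexError (tupTable[1] does not exist).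
def Pre_getLyricDuration (tupTable : List (String × Int)) (mp4Length : Int) : Prop :=
  tupTable.length ≠ 1
instance (tupTable : List (String × Int)) (mp4Length : Int) : Decidable (Pre_getLyricDuration tupTable mp4Length) := by unfold Pre_getLyricDuration; infer_instance

def pvWitness_getLyricDuration : (List (String × Int)) × Int := ([("a", 3), ("b", 7)], 10)

def Spec_getLyricDuration (tupTable : List (String × Int)) (mp4Length : Int) (out : List (String × Int)) : Prop := out = getLyricDuration_alt tupTable mp4Length
instance (tupTable : List (String × Int)) (mp4Length : Int) (out : List (String × Int)) : Decidable (Spec_getLyricDuration tupTable mp4Length out) := by unfold Spec_getLyricDuration; infer_instance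

-- ===== CLAIM (what is proved, stated in full; the proofs are below) =====
def Claim_equal_getLyricDuration : Prop := ∀ (tupTable : List (String × Int)) (mp4Length : Int), Dom_getLyricDuration tupTable mp4Length → Pre_getLyricDuration tupTable mp4Length → Spec_getLyricDuration tupTable mp4Length (getLyricDuration tupTable mp4Length)

-- ===== LEMMAS AND PROOFS =====

lemma portA_map (t : List (String × Int)) (m : Int) :
    getLyricDuration t m = (List.range t.length).map (fun k =>
      if k = 0 then ((t.getD 0 ("", 0)).1, (t.getD 1 ("", 0)).2)
      else if k < t.length - 1 then
        ((t.getD k ("", 0)).1, (t.getD (k+1) ("", 0)).2 - (t.getD k ("", 0)).2)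
      else ((t.getD k ("", 0)).1, m - (t.getD k ("", 0)).2)) := by
  unfold getLyricDuration
  rw [PySem.List.pyRange_zero_natCast, List.foldl_map]
  have h : (fun (sub : List (String × Int)) (k : Nat) =>
      if ((k : Int)) = 0 then
        sub ++ [((PySem.List.pyGetD t (k : Int) ("", 0)).1,
                 (PySem.List.pyGetD t 1 ("", 0)).2)]
      else if ((k : Int)) < (t.length : Int) - 1 then
        sub ++ [((PySem.List.pyGetD t (k : Int) ("", 0)).1,
                 (PySem.List.pyGetD t ((k : Int) + 1) ("", 0)).2
                   - (PySem.List.pyGetD t (k : Int) ("", 0)).2)]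
      else
        sub ++ [((PySem.List.pyGetD t (k : Int) ("", 0)).1,
                 m - (PySem.List.pyGetD t (k : Int) ("", 0)).2)])
      = fun sub k => sub ++ [(fun k =>
      if k = 0 then ((t.getD 0 ("", 0)).1, (t.getD 1 ("", 0)).2)
      else if k < t.length - 1 then
        ((t.getD k ("", 0)).1, (t.getD (k+1) ("", 0)).2 - (t.getD k ("", 0)).2)
      else ((t.getD k ("", 0)).1, m - (t.getD k ("", 0)).2)) k] := by
    funext sub k
    have e1 : ((k : Int)) = 0 ↔ k = 0 := by omega
    have e2 : ((k : Int)) < (t.length : Int) - 1 ↔ k < t.length - 1 := by omega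
    have e3 : ((k : Int)) + 1 = ((k + 1 : Nat) : Int) := by push_cast; ring
    simp only [e3, PySem.List.pyGetD_natCast, PySem.List.pyGetD_ofNat']
    split_ifs with h1 h2 h3 h4 <;> simp_all
  rw [h, PySem.List.foldl_append_singleton_eq_map]
  simp

-- reverse-pass loop of B, characterised as a forward zip over successors
lemma foldB_eq (l : List (String × Int)) (m : Int) :
    l.reverse.foldl
      (fun (st : List (String × Int) × Int) p =>
        (st.1 ++ [(p.1, st.2 - p.2)], p.2)) ([], m)
      = (((l.zip ((l.drop 1).map Prod.snd ++ [m])).map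
            (fun p => (p.1.1, p.2 - p.1.2))).reverse,
         if h : l = [] then m else (l.head h).2) := by
  induction l with
  | nil => simp
  | cons p l ih =>
    rw [List.reverse_cons, List.foldl_append, ih]
    cases l with
    | nil => simp
    | cons q rs => simp

lemma main_eq (t : List (String × Int)) (m : Int) (h : t.length ≠ 1) :
    getLyricDuration t m = getLyricDuration_alt t m := by
  rcases t with _ | ⟨a, _ | ⟨b, rest⟩⟩
  · simp [portA_map, getLyricDuration_alt]
  · simp at h
  · rw [portA_map]
    have hslice : PySem.List.slice (a :: b :: rest) (some 1) none = b :: rest := by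
      rw [PySem.List.slice_from _ (show (0:Int) ≤ 1 by norm_num)]
      simp
    have halt : getLyricDuration_alt (a :: b :: rest) m =
        (a.1, b.2) ::
          (((b :: rest).zip ((rest).map Prod.snd ++ [m])).map
            (fun p => (p.1.1, p.2 - p.1.2))) := by
      simp only [getLyricDuration_alt]
      rw [hslice, foldB_eq]
      have h0 : (0:Int) ≤ (rest.length:Int) + 1 := by positivity
      simp [PySem.List.pyGetD, PySem.List.pyGet?, PySem.List.pyIdx?, h0]
    rw [halt]
    apply List.ext_getElem
    · simp
    · intro i h1 h2
      simp only [List.length_map, List.length_range] at h1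
      simp only [List.getElem_map, List.getElem_range]
      rcases Nat.eq_zero_or_pos i with hi0 | hip
      · subst hi0; simp
      · obtain ⟨j, rfl⟩ : ∃ j, i = j + 1 := ⟨i - 1, by omega⟩
        rw [List.getElem_cons_succ]
        simp only [List.getElem_map, List.getElem_zip]
        have hlen : (a :: b :: rest).length = rest.length + 2 := by simp
        by_cases hlast : j = rest.length
        · subst hlast
          rw [List.getElem_append_right (by simp)]
          rw [if_neg (by omega), if_neg (by omega)]
          simp only [List.length_map, Nat.sub_self, List.getElem_singleton]
          rw [List.getD_eq_getElem _ _ (by simp)]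
          simp
        · have hjm : j < rest.length := by omega
          rw [List.getElem_append_left (by simpa using hjm)]
          rw [if_neg (by omega), if_pos (by simp; omega)]
          rw [List.getD_eq_getElem _ _ (by simp; omega),
              List.getD_eq_getElem _ _ (by simp; omega)]
          simp

-- ===== VERDICT (by name: the statement is the Claim_ definition above) =====
theorem getLyricDuration_spec : Claim_equal_getLyricDuration := by
  intro t m _ hpre
  exact main_eq t m hpre
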